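-- pv_equiv track=rewrite | github.com/quietsec/octoscat | octoscat/__init__.py | find_suspicious_strings
-- ===== SOURCE A (Python) =====
-- def find_suspicious_strings(word, charset, threshold=20):
--     '''
--     Iterate through each character of a word, and parse out long strings that
--     contain only characters in the given `charset` (base64/hex).
--
--     Args:
--         word (str): string of characters
--         charset (str): a string of characters that define your charset.
--             It is recommended to use the provided `B64_CHARS` or
--             `HEX_CHARS` charsets.
--         threshold (int): threshold of characters to consider the given word a
--             potential match. Defaults to 20.
--     Returns: (list) of suspicious strings.
--     '''
--     char_match_count = 0
--     matched_chars = ''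
--     strings = []
--
--     for char in word:
--         # If character exists in the given charset (base64/hex), concat the
--         # character into `matched_chars`, and increment `char_match_count`.
--         if char in charset:
--             matched_chars += char
--             char_match_count += 1
--         else:
--             # If current character does not exist in the given charset, we've
--             # reached the end of a potential matched string.
--             #
--             # So we'll check if the matched character count  is greater than
--             # our desired threshhold (20chars default).
--             #
--             # If it is not, we will drop this string.
--             #
--             # If the `character_match_count` is greater than the specified
--             # threshhold, it's probably a match and we should keep it.
--             if char_match_count > threshold:
--                 strings.append(matched_chars)
--
--             matched_chars = ''
--             char_match_count = 0
--
--     # If the character match count is greater than the threshold, append it to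
--     # the strings array.
--     if char_match_count > threshold:
--         strings.append(matched_chars)
--
--     return strings
-- ===== SOURCE B (Python) =====
-- def find_suspicious_strings(word, charset, threshold=20):
--     cs = set(charset)
--     out = []
--     i, n = 0, len(word)
--     while True:
--         j = i
--         while j < n and word[j] in cs:
--             j += 1
--         if j - i > threshold:
--             out.append(word[i:j])
--         if j == n:
--             return out
--         i = j + 1
-- ===== Notes on version B (the rewrite author's own statement) =====
-- stated objective: faster
-- what changed: A maintains a running match counter and an accumulator string rebuilt char-by-char and flushed at every non-charset character; B is a two-pointer scanner that finds each maximal run as a slice word[i:j] and appends it after a single length test, with O(1) set membership instead of scanning the charset string per character.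
import Mathlib
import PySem

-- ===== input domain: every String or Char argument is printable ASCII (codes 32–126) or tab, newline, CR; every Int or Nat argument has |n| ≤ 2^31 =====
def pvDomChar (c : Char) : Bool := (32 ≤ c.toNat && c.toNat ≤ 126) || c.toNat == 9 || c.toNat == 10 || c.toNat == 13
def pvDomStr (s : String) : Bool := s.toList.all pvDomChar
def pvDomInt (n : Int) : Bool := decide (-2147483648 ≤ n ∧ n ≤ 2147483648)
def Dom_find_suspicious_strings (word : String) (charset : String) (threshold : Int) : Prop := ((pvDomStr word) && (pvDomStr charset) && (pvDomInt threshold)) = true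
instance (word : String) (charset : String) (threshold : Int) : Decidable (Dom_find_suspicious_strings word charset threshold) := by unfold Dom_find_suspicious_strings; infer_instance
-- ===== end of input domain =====

-- B replaces A's accumulator-and-flush scan with a two-pointer run scanner (each maximal run taken as a slice, filtered by length, set membership); measured faster in a timing run. Return-value equivalence; neither mutates its arguments.


-- ===== PORT A =====
-- state: (char_match_count, matched_chars, strings); 'char in charset' on a str is, for a single char, list membership (exact)
def fssStepA (cs : List Char) (threshold : Int) (s : Int × List Char × List String) (c : Char) : Int × List Char × List String :=
  let (cnt, matched, strings) := s
  if c ∈ cs then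
    (cnt + 1, matched ++ [c], strings)
  else
    if cnt > threshold then (0, [], strings ++ [String.ofList matched])
    else (0, [], strings)

def find_suspicious_strings (word : String) (charset : String) (threshold : Int) : List String :=
  let r := word.toList.foldl (fssStepA charset.toList threshold) (0, [], [])
  if r.1 > threshold then r.2.2 ++ [String.ofList r.2.1] else r.2.2

-- ===== PORT B =====
-- outer 'while True' loop of Source B; the inner scanning while-loop (j advancing over charset chars)
-- is the takeWhile/dropWhile split of the rest of the word, run = word[i:j]
def fssGoB (cs : List Char) (threshold : Int) (l : List Char) (out : List String) : List String :=
  let run := l.takeWhile (fun c => cs.contains c)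
  let out' := if (run.length : Int) > threshold then out ++ [String.ofList run] else out
  match h : l.dropWhile (fun c => cs.contains c) with
  | [] => out'
  | _ :: rest' => fssGoB cs threshold rest' out'
termination_by l.length
decreasing_by
  have h1 := List.length_dropWhile_le (p := fun c => cs.contains c) (l := l)
  rw [h] at h1
  simp at h1
  omega

def find_suspicious_strings_alt (word : String) (charset : String) (threshold : Int) : List String :=
  fssGoB (PySem.Set.ofList charset.toList) threshold word.toList []

-- ===== PRECONDITION & SPEC =====
def Spec_find_suspicious_strings (word : String) (charset : String) (threshold : Int) (out : List String) : Prop := out = find_suspicious_strings_alt word charset threshold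
instance (word : String) (charset : String) (threshold : Int) (out : List String) : Decidable (Spec_find_suspicious_strings word charset threshold out) := by unfold Spec_find_suspicious_strings; infer_instance

-- ===== CLAIM (what is proved, stated in full; the proofs are below) =====
def Claim_equal_find_suspicious_strings : Prop := ∀ (word : String) (charset : String) (threshold : Int), Dom_find_suspicious_strings word charset threshold → Spec_find_suspicious_strings word charset threshold (find_suspicious_strings word charset threshold)

-- ===== LEMMAS AND PROOFS =====

-- generalized B: an already-scanned prefix `pre` of the current run
def fssGoB' (cs : List Char) (threshold : Int) (pre l : List Char) (out : List String) : List String :=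
  let run := pre ++ l.takeWhile (fun c => cs.contains c)
  let out' := if (run.length : Int) > threshold then out ++ [String.ofList run] else out
  match _h : l.dropWhile (fun c => cs.contains c) with
  | [] => out'
  | _ :: rest' => fssGoB cs threshold rest' out'

theorem fssGoB_eq_go' (cs : List Char) (t : Int) (l : List Char) (out : List String) :
    fssGoB cs t l out = fssGoB' cs t [] l out := by
  rw [fssGoB, fssGoB']
  simp only [List.nil_append]

theorem fssGoB'_cons_mem (cs : List Char) (t : Int) (pre : List Char) (c : Char) (r : List Char)
    (out : List String) (h : cs.contains c = true) :
    fssGoB' cs t pre (c :: r) out = fssGoB' cs t (pre ++ [c]) r out := by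
  have h' : c ∈ cs := by simpa using h
  simp only [fssGoB', List.takeWhile_cons, List.append_assoc]
  rw [List.dropWhile_cons_of_pos (by simpa using h')]
  cases hd : List.dropWhile (fun c => cs.contains c) r <;> simp [h']

theorem fssGoB'_cons_not_mem (cs : List Char) (t : Int) (pre : List Char) (c : Char) (r : List Char)
    (out : List String) (h : ¬ cs.contains c = true) :
    fssGoB' cs t pre (c :: r) out =
      fssGoB' cs t [] r (if (pre.length : Int) > t then out ++ [String.ofList pre] else out) := by
  have h' : ¬ c ∈ cs := by simpa using h
  rw [← fssGoB_eq_go' cs t r (if (pre.length : Int) > t then out ++ [String.ofList pre] else out)]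
  rw [fssGoB']
  simp only [List.takeWhile_cons]
  rw [List.dropWhile_cons_of_neg (by simpa using h')]
  simp [h']

-- main invariant: A's fold followed by the final flush, started in state (|pre|, pre, out),
-- computes B's scanner with prefix pre
theorem fss_key (cs css : List Char) (hcs : ∀ c, c ∈ cs ↔ css.contains c = true) (t : Int)
    (l pre : List Char) (out : List String) :
    (if (l.foldl (fssStepA cs t) ((pre.length : Int), pre, out)).1 > t then
       (l.foldl (fssStepA cs t) ((pre.length : Int), pre, out)).2.2
         ++ [String.ofList (l.foldl (fssStepA cs t) ((pre.length : Int), pre, out)).2.1]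
     else (l.foldl (fssStepA cs t) ((pre.length : Int), pre, out)).2.2)
      = fssGoB' css t pre l out := by
  induction l generalizing pre out with
  | nil => simp [fssGoB']
  | cons c r ih =>
    simp only [List.foldl_cons, fssStepA]
    by_cases h' : c ∈ cs
    · rw [if_pos h', fssGoB'_cons_mem css t pre c r out ((hcs c).mp h')]
      have hl : (((pre ++ [c]).length : Nat) : Int) = (pre.length : Int) + 1 := by simp
      rw [← hl]
      exact ih (pre ++ [c]) out
    · rw [if_neg h',
        fssGoB'_cons_not_mem css t pre c r out (fun hc => h' ((hcs c).mpr hc))]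
      by_cases hf : (pre.length : Int) > t
      · rw [if_pos hf, if_pos hf]
        simpa using ih [] (out ++ [String.ofList pre])
      · rw [if_neg hf, if_neg hf]
        simpa using ih [] out

-- ===== VERDICT (by name: the statement is the Claim_ definition above) =====
theorem find_suspicious_strings_spec : Claim_equal_find_suspicious_strings := by
  intro word charset threshold _
  unfold Spec_find_suspicious_strings find_suspicious_strings find_suspicious_strings_alt
  rw [fssGoB_eq_go']
  have hcs : ∀ c, c ∈ charset.toList ↔ (PySem.Set.ofList charset.toList).contains c = true := by
    intro c
    simp [PySem.Set.mem_ofList]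
  simpa using fss_key charset.toList (PySem.Set.ofList charset.toList) hcs threshold
    word.toList [] []
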